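/-
  MAPPINGS AND MODES: `MappingOK` = MP1–MP6, `ModeOK` = MD1–MD2 of design/INVARIANTS.md §3.5 (the FIXED source: `Mapping` is 56
  bytes, `submap_floor[16]` at +17, `submap_residue[16]` at +33: FIX 8, so MP6 speaks about the right bytes), the lemmas that USE
  them at check sites (`site_…`), the two-address frame lemmas (`MappingOK.transfer`, `ModeOK.transfer`, `MappingDeinitOK.transfer`
  and their instances `.frame`, `.reblk`), the transients `MappingUpTo` (= MAPS(i) of CONTRACTS, start_decoder section R), `ModeUpTo`.
  The documentation of the whole unit is the header of Vorbis/ResidueMapping.lean; the vocabulary is Vorbis/Blocks.lean.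
-/
import Vorbis.ResidueMapping.ResidueFrame
namespace Vorbis
open X86 X86.User Asan

/-! ### The per-index CONTENT clauses (named, so that a loop can carry "the clause below a counter": `Res.forall_lt_succ`) -/

/-- MP4 for coupling step `k` of the mapping at `m`: `magnitude < C`, `angle < C`, `magnitude ≠ angle`. -/
def Mapping.CouplingOK (mem : Mem) (f m k : Nat) : Prop :=
  (MappingChannel.magnitude mem (Mapping.chan_at mem m k) : Int) < stb_vorbis.channels mem f ∧
    (MappingChannel.angle mem (Mapping.chan_at mem m k) : Int) < stb_vorbis.channels mem f ∧
    MappingChannel.magnitude mem (Mapping.chan_at mem m k) ≠ MappingChannel.angle mem (Mapping.chan_at mem m k)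

/-- MP5 for channel `j`: `chan[j].mux < submaps`. -/
def Mapping.MuxOK (mem : Mem) (m j : Nat) : Prop :=
  MappingChannel.mux mem (Mapping.chan_at mem m j) < Mapping.submaps mem m

/-- MP6 for submap `s`: `submap_floor[s] < floor_count ∧ submap_residue[s] < residue_count` (on the bytes `m+17+s` and `m+33+s`
of the FIXED layout: no aliasing of `submap_floor[15]` with `submap_residue[0]`). -/
def Mapping.SubmapOK (mem : Mem) (f m s : Nat) : Prop :=
  (Mapping.submap_floor mem m s : Int) < stb_vorbis.floor_count mem f ∧
    (Mapping.submap_residue mem m s : Int) < stb_vorbis.residue_count mem f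

/-- MD2 for mode `i`: `blockflag ≤ 1`, `mapping < mapping_count`, `windowtype = transformtype = 0`. -/
def ModeRecOK (mem : Mem) (f i : Nat) : Prop :=
  Mode.blockflag mem (stb_vorbis.mode_config_at f i) ≤ 1 ∧
    (Mode.mapping mem (stb_vorbis.mode_config_at f i) : Int) < stb_vorbis.mapping_count mem f ∧
    Mode.windowtype mem (stb_vorbis.mode_config_at f i) = 0 ∧ Mode.transformtype mem (stb_vorbis.mode_config_at f i) = 0

/-! ### MP2–MP6: one record -/

/-- **The clauses MP2 … MP6 of INVARIANTS §3.5 for the mapping record at address `m`.** -/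
structure MappingAtOK (Blk : Block → Prop) (mem : Mem) (f m : Nat) : Prop where
  /-- MP2 SHAPE: `Block(chan, 3·C)`. For: `chan[j]`, `j < C`; `chan[k]`, `k < coupling_steps ≤ C`. -/
  MP2 : Blk ⟨Mapping.chan mem m, Off.sizeof.MappingChannel * nchan mem f⟩
  /-- MP3 FIELD: `1 ≤ submaps ≤ 16` (= the length of `submap_floor[16]`, `submap_residue[16]`: FIX 8). -/
  MP3 : 1 ≤ Mapping.submaps mem m ∧ Mapping.submaps mem m ≤ 16
  /-- MP4 CONTENT, first half: `coupling_steps ≤ C`. -/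
  MP4_steps : (Mapping.coupling_steps mem m : Int) ≤ stb_vorbis.channels mem f
  /-- MP4 CONTENT: for every coupling step magnitude and angle are channels, and different. For: `channel_buffers[·]`. -/
  MP4 : ∀ k : Nat, k < Mapping.coupling_steps mem m → Mapping.CouplingOK mem f m k
  /-- MP5 CONTENT: `mux < submaps` for every channel. For: `submap_floor[mux]`. -/
  MP5 : ∀ j : Nat, (j : Int) < stb_vorbis.channels mem f → Mapping.MuxOK mem m j
  /-- MP6 CONTENT: floor and residue numbers of every submap are in range. For: `floor_config[·]`, `decode_residue(…, rn, …)`. -/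
  MP6 : ∀ s : Nat, s < Mapping.submaps mem m → Mapping.SubmapOK mem f m s

/-! ### MP1–MP6: all records; the records below a counter (the transient MAPS(i)) -/

/-- **`MappingOK`: clauses MP1–MP6.** Established by start_decoder 4091–4138 (SD.8), read-only afterwards. -/
structure MappingOK (Blk : Block → Prop) (mem : Mem) (f : Nat) : Prop where
  /-- MP1 FIELD: `1 ≤ mapping_count ≤ 64`. -/
  MP1 : 1 ≤ stb_vorbis.mapping_count mem f ∧ stb_vorbis.mapping_count mem f ≤ 64
  /-- MP1 SHAPE: `Block(mapping, 56·mapping_count)` (stride 56: FIX 8). -/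
  MP1_block : Blk ⟨stb_vorbis.mapping mem f, Off.sizeof.Mapping * (stb_vorbis.mapping_count mem f).toNat⟩
  /-- MP2–MP6 for every record. -/
  record : ∀ i : Nat, (i : Int) < stb_vorbis.mapping_count mem f → MappingAtOK Blk mem f (stb_vorbis.mapping_at mem f i)

/-- **MAPS(n)** (CONTRACTS, start_decoder section R) without its zero part (which no check site and no clause of DeinitOK
needs: vorbis_deinit only LOADS `mapping[i].chan`): MP1, and MP2–MP6 for the records `i < n`. The invariant of the mapping
loop 4095; `MappingOK` is `MappingUpTo … mapping_count`. -/
structure MappingUpTo (Blk : Block → Prop) (mem : Mem) (f n : Nat) : Prop where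
  /-- the counter is at most `mapping_count` -/
  n_le : (n : Int) ≤ stb_vorbis.mapping_count mem f
  /-- MP1 -/
  MP1 : 1 ≤ stb_vorbis.mapping_count mem f ∧ stb_vorbis.mapping_count mem f ≤ 64
  /-- MP1, the block -/
  MP1_block : Blk ⟨stb_vorbis.mapping mem f, Off.sizeof.Mapping * (stb_vorbis.mapping_count mem f).toNat⟩
  /-- MP2–MP6 for the records below the counter -/
  record : ∀ i : Nat, i < n → MappingAtOK Blk mem f (stb_vorbis.mapping_at mem f i)

/-- **H5, the deinit form of MP1** — holds at every return of start_decoder: `mapping = NULL`, or the block of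
`56·mapping_count` bytes (vorbis_deinit loads `mapping[i].chan` at stride 56 and passes the value to the no-op `setup_free`). -/
def MappingDeinitOK (Blk : Block → Prop) (mem : Mem) (f : Nat) : Prop :=
  stb_vorbis.mapping mem f = 0 ∨
    Blk ⟨stb_vorbis.mapping mem f, Off.sizeof.Mapping * (stb_vorbis.mapping_count mem f).toNat⟩

namespace MappingOK
variable {Blk : Block → Prop} {mem : Mem} {f : Nat}

/-- `MappingOK` is the transient at `n = mapping_count`. -/
theorem toUpTo (h : MappingOK Blk mem f) : MappingUpTo Blk mem f (stb_vorbis.mapping_count mem f).toNat := by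
  have h1 := h.MP1
  exact ⟨by omega, h.MP1, h.MP1_block, fun i hi => h.record i (by omega)⟩

/-- `MappingOK ⇒ H5`. -/
theorem deinit (h : MappingOK Blk mem f) : MappingDeinitOK Blk mem f := Or.inr h.MP1_block

/-- MP3 of record `i`. -/
theorem MP3 (h : MappingOK Blk mem f) (i : Nat) (hi : (i : Int) < stb_vorbis.mapping_count mem f) :
    1 ≤ Mapping.submaps mem (stb_vorbis.mapping_at mem f i) ∧ Mapping.submaps mem (stb_vorbis.mapping_at mem f i) ≤ 16 :=
  (h.record i hi).MP3

/-- MP5 of record `i`. -/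
theorem MP5 (h : MappingOK Blk mem f) (i : Nat) (hi : (i : Int) < stb_vorbis.mapping_count mem f) (j : Nat)
    (hj : (j : Int) < stb_vorbis.channels mem f) : Mapping.MuxOK mem (stb_vorbis.mapping_at mem f i) j :=
  (h.record i hi).MP5 j hj

/-- MP6 of record `i`. -/
theorem MP6 (h : MappingOK Blk mem f) (i : Nat) (hi : (i : Int) < stb_vorbis.mapping_count mem f) (s : Nat)
    (hs : s < Mapping.submaps mem (stb_vorbis.mapping_at mem f i)) : Mapping.SubmapOK mem f (stb_vorbis.mapping_at mem f i) s :=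
  (h.record i hi).MP6 s hs

end MappingOK

namespace MappingUpTo
variable {Blk : Block → Prop} {mem : Mem} {f n : Nat}

/-- After `memset(mapping, 0, …)` (start_decoder.R2 exit): no record is claimed yet. -/
theorem zero (h1 : 1 ≤ stb_vorbis.mapping_count mem f ∧ stb_vorbis.mapping_count mem f ≤ 64)
    (h2 : Blk ⟨stb_vorbis.mapping mem f, Off.sizeof.Mapping * (stb_vorbis.mapping_count mem f).toNat⟩) :
    MappingUpTo Blk mem f 0 :=
  ⟨by omega, h1, h2, fun i hi => by omega⟩

/-- The step of the mapping loop (`++i` at the end of start_decoder.R12): record `n` is complete. -/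
theorem succ (h : MappingUpTo Blk mem f n) (hn : (n : Int) < stb_vorbis.mapping_count mem f)
    (hr : MappingAtOK Blk mem f (stb_vorbis.mapping_at mem f n)) : MappingUpTo Blk mem f (n + 1) := by
  refine ⟨by omega, h.MP1, h.MP1_block, ?_⟩
  intro i hi
  by_cases e : i = n
  · subst e
    exact hr
  · exact h.record i (by omega)

/-- The loop is left (`i = mapping_count`, SD.8): `MappingOK`. -/
theorem toOK (h : MappingUpTo Blk mem f n) (hn : (n : Int) = stb_vorbis.mapping_count mem f) : MappingOK Blk mem f :=
  ⟨h.MP1, h.MP1_block, fun i hi => h.record i (by omega)⟩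

/-- Every exit of the mapping section: H5. -/
theorem deinit (h : MappingUpTo Blk mem f n) : MappingDeinitOK Blk mem f := Or.inr h.MP1_block

end MappingUpTo

/-! ### MD1–MD2 -/

/-- **`ModeOK`: clauses MD1–MD2.** `mode_config[64]` is inside `*f`. Established by start_decoder 4142–4151 (SD.9). -/
structure ModeOK (mem : Mem) (f : Nat) : Prop where
  /-- MD1 FIELD: `1 ≤ mode_count ≤ 64`. For: `mode_config + 6i` inside `*f`; `ilog(mode_count − 1) ≤ 6`. -/
  MD1 : 1 ≤ stb_vorbis.mode_count mem f ∧ stb_vorbis.mode_count mem f ≤ 64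
  /-- MD2 CONTENT (in `*f`): every mode record is well formed. For: `blocksize[blockflag]`, `&mapping[m->mapping]`. -/
  MD2 : ∀ i : Nat, (i : Int) < stb_vorbis.mode_count mem f → ModeRecOK mem f i

/-- **The invariant of the mode loop 4143**: MD1, and MD2 for the modes below the counter. -/
structure ModeUpTo (mem : Mem) (f n : Nat) : Prop where
  /-- the counter is at most `mode_count` -/
  n_le : (n : Int) ≤ stb_vorbis.mode_count mem f
  /-- MD1 -/
  MD1 : 1 ≤ stb_vorbis.mode_count mem f ∧ stb_vorbis.mode_count mem f ≤ 64
  /-- MD2 below the counter -/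
  MD2 : ∀ i : Nat, i < n → ModeRecOK mem f i

namespace ModeUpTo
variable {mem : Mem} {f n : Nat}

/-- After `f->mode_count = get_bits(f, 6)+1` (start_decoder.R8 exit). -/
theorem zero (h1 : 1 ≤ stb_vorbis.mode_count mem f ∧ stb_vorbis.mode_count mem f ≤ 64) : ModeUpTo mem f 0 :=
  ⟨by omega, h1, fun i hi => by omega⟩

/-- One mode record parsed and tested (start_decoder.R14). -/
theorem succ (h : ModeUpTo mem f n) (hn : (n : Int) < stb_vorbis.mode_count mem f) (hr : ModeRecOK mem f n) :
    ModeUpTo mem f (n + 1) :=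
  ⟨by omega, h.MD1, Res.forall_lt_succ h.MD2 hr⟩

/-- The loop is left (SD.9). -/
theorem toOK (h : ModeUpTo mem f n) (hn : (n : Int) = stb_vorbis.mode_count mem f) : ModeOK mem f :=
  ⟨h.MD1, fun i hi => h.MD2 i (by omega)⟩

end ModeUpTo

/-- `ModeOK` is the transient at `n = mode_count`. -/
theorem ModeOK.toUpTo {mem : Mem} {f : Nat} (h : ModeOK mem f) : ModeUpTo mem f (stb_vorbis.mode_count mem f).toNat := by
  have h1 := h.MD1
  exact ⟨by omega, h.MD1, fun i hi => h.MD2 i (by omega)⟩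

/-! ### USE: the check sites (every lemma returns a `Site`: see Vorbis/Blocks.lean §1) -/

section use
variable {Live : Nat → Prop} {Blk : Block → Prop} {mem : Mem} {f : Nat}

/-- **`f->mode_config[i]`**, `i < mode_count`: the `n` bytes at offset `off` of the 6-byte `Mode` record, inside `*f` (OB1 + MD1).
(`m + {0,1}` in vorbis_decode_packet_rest, `rbx + {0,1,2,4}` in start_decoder.R14, `f + 0x1e4 + 6i` in vorbis_decode_initial.) -/
theorem ModeUpTo.site_mode {k : Nat} (hL : BlkLive Blk Live) (hob : Blk (objBlock f)) (h : ModeUpTo mem f k) {i : Nat}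
    (hi : (i : Int) < stb_vorbis.mode_count mem f) (off n : Nat) (hoff : off + n ≤ Off.sizeof.Mode) (hn : 1 ≤ n) {a : Nat}
    (ha : a = stb_vorbis.mode_config_at f i + off) : Site Live a n := by
  subst ha
  have h1 := h.MD1
  apply Site.of_blk hL hob
  · simp only [vblock, vacc, voff]
    omega
  · simp only [vblock, vacc, voff] at hoff ⊢
    omega
  · exact hn

/-- **`f->mode_config[i]`** from `ModeOK`. -/
theorem ModeOK.site_mode (hL : BlkLive Blk Live) (hob : Blk (objBlock f)) (h : ModeOK mem f) {i : Nat}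
    (hi : (i : Int) < stb_vorbis.mode_count mem f) (off n : Nat) (hoff : off + n ≤ Off.sizeof.Mode) (hn : 1 ≤ n) {a : Nat}
    (ha : a = stb_vorbis.mode_config_at f i + off) : Site Live a n :=
  h.toUpTo.site_mode hL hob hi off n hoff hn ha

/-- MD2: the mode's mapping number is a mapping (`&f->mapping[m->mapping]`). -/
theorem ModeOK.mapping_lt (h : ModeOK mem f) {i : Nat} (hi : (i : Int) < stb_vorbis.mode_count mem f) :
    (Mode.mapping mem (stb_vorbis.mode_config_at f i) : Int) < stb_vorbis.mapping_count mem f := (h.MD2 i hi).2.1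

/-- MD2: `blockflag ∈ {0, 1}` (`f->blocksize[m->blockflag]`, `A[blockflag]` …). -/
theorem ModeOK.blockflag_le (h : ModeOK mem f) {i : Nat} (hi : (i : Int) < stb_vorbis.mode_count mem f) :
    Mode.blockflag mem (stb_vorbis.mode_config_at f i) ≤ 1 := (h.MD2 i hi).1

/-- The mode number is checked: vorbis_decode_initial reads `i = get_bits(f, ilog(mode_count − 1))` and returns FALSE when
`i >= f->mode_count` (signed compare, `0 ≤ i`); afterwards `i < mode_count ≤ 64`, so `mode_config + 6i` is inside `*f`. -/
theorem ModeOK.mode_index_lt (h : ModeOK mem f) {i : Nat} (hi : (i : Int) < stb_vorbis.mode_count mem f) : i < 64 := by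
  have := h.MD1
  omega

/-- **`f->mapping[i]`**: the `n` bytes at offset `off` of the 56-byte `Mapping` record `i < mapping_count` (`map + {0, 8, 16,
17+s, 33+s}`). From MP1. -/
theorem MappingUpTo.site_record {k : Nat} (hL : BlkLive Blk Live) (h : MappingUpTo Blk mem f k) {i : Nat}
    (hi : (i : Int) < stb_vorbis.mapping_count mem f) (off n : Nat) (hoff : off + n ≤ Off.sizeof.Mapping) (hn : 1 ≤ n)
    {a : Nat} (ha : a = stb_vorbis.mapping_at mem f i + off) : Site Live a n := by
  subst ha
  apply Site.of_blk hL h.MP1_block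
  · simp only [vacc, voff]
    omega
  · simp only [vacc, voff] at hi hoff ⊢
    omega
  · exact hn

/-- **`f->mapping[i]`** from `MappingOK`. -/
theorem MappingOK.site_record (hL : BlkLive Blk Live) (h : MappingOK Blk mem f) {i : Nat}
    (hi : (i : Int) < stb_vorbis.mapping_count mem f) (off n : Nat) (hoff : off + n ≤ Off.sizeof.Mapping) (hn : 1 ≤ n)
    {a : Nat} (ha : a = stb_vorbis.mapping_at mem f i + off) : Site Live a n :=
  h.toUpTo.site_record hL hi off n hoff hn ha

/-- **`map->submap_floor[s]`**, `s < 16` (load1 at `map + 17 + s`): inside the 56-byte record for EVERY `s ≤ 15`, so the access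
needs only MP1; the VALUE needs `s < submaps` (MP6). -/
theorem MappingOK.site_submap_floor (hL : BlkLive Blk Live) (h : MappingOK Blk mem f) {i : Nat}
    (hi : (i : Int) < stb_vorbis.mapping_count mem f) {s : Nat} (hs : s < Off.Mapping.submap_floor.count) {a : Nat}
    (ha : a = stb_vorbis.mapping_at mem f i + Off.Mapping.submap_floor + s) : Site Live a 1 := by
  apply h.site_record hL hi (Off.Mapping.submap_floor + s) 1 (by simp only [voff] at hs ⊢; omega) (by omega)
  rw [ha, Nat.add_assoc]

/-- **`map->submap_residue[s]`**, `s < 16` (load1 at `map + 33 + s` ⚠G1: FIX 8). -/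
theorem MappingOK.site_submap_residue (hL : BlkLive Blk Live) (h : MappingOK Blk mem f) {i : Nat}
    (hi : (i : Int) < stb_vorbis.mapping_count mem f) {s : Nat} (hs : s < Off.Mapping.submap_residue.count) {a : Nat}
    (ha : a = stb_vorbis.mapping_at mem f i + Off.Mapping.submap_residue + s) : Site Live a 1 := by
  apply h.site_record hL hi (Off.Mapping.submap_residue + s) 1 (by simp only [voff] at hs ⊢; omega) (by omega)
  rw [ha, Nat.add_assoc]

variable {m : Nat}

/-- **`map->chan[j]`**, `j < C`: the `n` bytes at offset `off` of the 3-byte `MappingChannel` (`chan + 3j + {0,1,2}`). From MP2. -/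
theorem MappingAtOK.site_chan (hL : BlkLive Blk Live) (h : MappingAtOK Blk mem f m) {j : Nat}
    (hj : (j : Int) < stb_vorbis.channels mem f) (off n : Nat) (hoff : off + n ≤ Off.sizeof.MappingChannel) (hn : 1 ≤ n)
    {a : Nat} (ha : a = Mapping.chan_at mem m j + off) : Site Live a n := by
  subst ha
  apply Site.of_blk hL h.MP2
  · simp only [vacc, voff]
    omega
  · simp only [nchan_def, vacc, voff] at hj hoff ⊢
    omega
  · exact hn

/-- **`map->chan[k]`**, `k < coupling_steps` (≤ C by MP4): the coupling loops. -/
theorem MappingAtOK.site_chan_step (hL : BlkLive Blk Live) (h : MappingAtOK Blk mem f m) {k : Nat}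
    (hk : k < Mapping.coupling_steps mem m) (off n : Nat) (hoff : off + n ≤ Off.sizeof.MappingChannel) (hn : 1 ≤ n)
    {a : Nat} (ha : a = Mapping.chan_at mem m k + off) : Site Live a n := by
  have h4 := h.MP4_steps
  exact h.site_chan hL (by omega) off n hoff hn ha

/-- MP4, magnitude: an index of `channel_buffers[16]` whose pointer is valid (`< C`). -/
theorem MappingAtOK.magnitude_lt (h : MappingAtOK Blk mem f m) {k : Nat} (hk : k < Mapping.coupling_steps mem m) :
    (MappingChannel.magnitude mem (Mapping.chan_at mem m k) : Int) < stb_vorbis.channels mem f := (h.MP4 k hk).1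

/-- MP4, angle. -/
theorem MappingAtOK.angle_lt (h : MappingAtOK Blk mem f m) {k : Nat} (hk : k < Mapping.coupling_steps mem m) :
    (MappingChannel.angle mem (Mapping.chan_at mem m k) : Int) < stb_vorbis.channels mem f := (h.MP4 k hk).2.1

/-- MP5 then MP3: `mux < submaps ≤ 16`, so `submap_floor[mux]` is one of the 16 bytes and MP6 applies to it. -/
theorem MappingAtOK.mux_lt (h : MappingAtOK Blk mem f m) {j : Nat} (hj : (j : Int) < stb_vorbis.channels mem f) :
    MappingChannel.mux mem (Mapping.chan_at mem m j) < Mapping.submaps mem m ∧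
      MappingChannel.mux mem (Mapping.chan_at mem m j) < 16 := by
  have h5 : MappingChannel.mux mem (Mapping.chan_at mem m j) < Mapping.submaps mem m := h.MP5 j hj
  have h3 := h.MP3
  omega

/-- MP6 through MP5: the floor number of a channel's submap is a floor (`floor_types[·]`, `floor_config + 1596·floor`). -/
theorem MappingAtOK.floor_of_mux_lt (h : MappingAtOK Blk mem f m) {j : Nat} (hj : (j : Int) < stb_vorbis.channels mem f) :
    (Mapping.submap_floor mem m (MappingChannel.mux mem (Mapping.chan_at mem m j)) : Int) < stb_vorbis.floor_count mem f :=
  (h.MP6 _ (h.mux_lt hj).1).1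

/-- MP6: the residue number handed to `decode_residue(f, …, rn, …)` is a residue: its precondition P1. -/
theorem MappingAtOK.residue_lt (h : MappingAtOK Blk mem f m) {s : Nat} (hs : s < Mapping.submaps mem m) :
    (Mapping.submap_residue mem m s : Int) < stb_vorbis.residue_count mem f := (h.MP6 s hs).2

/-- **From a checked mode number to its mapping record**: `map = &f->mapping[m->mapping]` satisfies MP2–MP6. -/
theorem MappingOK.of_mode (h : MappingOK Blk mem f) (hm : ModeOK mem f) {i : Nat}
    (hi : (i : Int) < stb_vorbis.mode_count mem f) :
    MappingAtOK Blk mem f (stb_vorbis.mapping_at mem f (Mode.mapping mem (stb_vorbis.mode_config_at f i))) :=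
  h.record _ (hm.mapping_lt hi)

/-- **`f->channel_buffers[c][k]`**, `c < C`, `k < n ≤ b1` (4-byte float at `channel_buffers[c] + 4k`). M6's first clause is a
HYPOTHESIS here (it belongs to Vorbis/Mdct.lean): `Block(channel_buffers[c], 4·b1)` for every `c < C`, `b1 = bsize mem f 1`.
Used by decode_residue (through `residue_buffers[i]`), inverse coupling (`m[j]`, `a[j]`, `j < n2`, indices by MP4), the floor
loop. -/
theorem site_channel_buffer (hL : BlkLive Blk Live)
    (hM6 : ∀ c : Nat, (c : Int) < stb_vorbis.channels mem f → Blk ⟨stb_vorbis.channel_buffers mem f c, 4 * bsize mem f 1⟩)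
    {c : Nat} (hcC : (c : Int) < stb_vorbis.channels mem f) {k n : Nat} (hk : k < n) (hn : n ≤ bsize mem f 1) {a : Nat}
    (ha : a = stb_vorbis.channel_buffers_at mem f c k) : Site Live a 4 := by
  subst ha
  apply Site.of_blk hL (hM6 c hcC)
  · simp only [vacc, voff]
    omega
  · simp only [vacc, voff]
    omega
  · omega

/-- The pointer slot `f->channel_buffers[c]` itself, `c < C ≤ 16`: inside `*f` (OB1 + HD1). -/
theorem site_channel_buffer_slot (hL : BlkLive Blk Live) (hob : Blk (objBlock f))
    (hHD1 : stb_vorbis.channels mem f ≤ 16) {c : Nat} (hcC : (c : Int) < stb_vorbis.channels mem f) {a : Nat}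
    (ha : a = f + Off.stb_vorbis.channel_buffers + Off.stb_vorbis.channel_buffers.elem * c) : Site Live a 8 := by
  subst ha
  apply Site.of_blk hL hob
  · simp only [vblock, voff]
    omega
  · simp only [vblock, voff]
    omega
  · omega

end use

/-! ### FRAME: windows, `Owns`, `transfer` -/

/-- **The windows of `*f` that ONE mapping record compares with**: `channels` `[4, 8)`, `floor_count` `[176, 180)`,
`residue_count` `[320, 324)`. -/
def MappingAtOK.wins : Wins := [(4, 8), (176, 180), (320, 324)]

/-- `MappingAtOK.wins` in field names (fails when the layout changes). -/
example : MappingAtOK.wins = [(Off.stb_vorbis.channels, Off.stb_vorbis.channels + 4),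
    (Off.stb_vorbis.floor_count, Off.stb_vorbis.floor_count + 4),
    (Off.stb_vorbis.residue_count, Off.stb_vorbis.residue_count + 4)] := by
  simp only [MappingAtOK.wins, voff]

/-- **The windows of `*f` that `MappingOK` reads**: those of a record, and `mapping_count`, `mapping` `[464, 480)`. -/
def MappingOK.wins : Wins := [(4, 8), (176, 180), (320, 324), (464, 480)]

/-- `MappingOK.wins` in field names (fails when the layout changes). -/
example : MappingOK.wins = [(Off.stb_vorbis.channels, Off.stb_vorbis.channels + 4),
    (Off.stb_vorbis.floor_count, Off.stb_vorbis.floor_count + 4),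
    (Off.stb_vorbis.residue_count, Off.stb_vorbis.residue_count + 4),
    (Off.stb_vorbis.mapping_count, Off.stb_vorbis.mode_count)] := by
  simp only [MappingOK.wins, voff]

/-- **The window of `*f` that H5 (`MappingDeinitOK`) reads**: `mapping_count`, `mapping` `[464, 480)`. -/
def MappingDeinitOK.wins : Wins := [(464, 480)]

/-- `MappingDeinitOK.wins` in field names (fails when the layout changes). -/
example : MappingDeinitOK.wins = [(Off.stb_vorbis.mapping_count, Off.stb_vorbis.mode_count)] := by
  simp only [MappingDeinitOK.wins, voff]

/-- **The windows of `*f` that `ModeOK` reads**: `mapping_count` `[464, 468)`; `mode_count`, `mode_config[64]` `[480, 868)`. -/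
def ModeOK.wins : Wins := [(464, 468), (480, 868)]

/-- `ModeOK.wins` in field names (fails when the layout changes). -/
example : ModeOK.wins = [(Off.stb_vorbis.mapping_count, Off.stb_vorbis.mapping_count + 4),
    (Off.stb_vorbis.mode_count, Off.stb_vorbis.total_samples)] := by
  simp only [ModeOK.wins, voff]

/-- **The windows of `*f` that `ModeUpTo … n` reads**: as `ModeOK.wins`, but of `mode_config[64]` only the records below the
counter: `[464, 468)`, `[480, 484 + 6n)`. So the stores into `mode_config[n]` of iteration `n` of the mode loop keep them
(`ModeUpTo.transfer_below`). -/
def ModeUpTo.wins (n : Nat) : Wins := [(464, 468), (480, 484 + 6 * n)]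

/-- `ModeUpTo.wins` in field names (fails when the layout changes). -/
example (n : Nat) : ModeUpTo.wins n = [(Off.stb_vorbis.mapping_count, Off.stb_vorbis.mapping_count + 4),
    (Off.stb_vorbis.mode_count, Off.stb_vorbis.mode_config + Off.stb_vorbis.mode_config.elem * n)] := by
  simp only [ModeUpTo.wins, voff]

/-- The window `mapping_count` is one of `ModeUpTo.wins n`. -/
theorem ModeUpTo.wins_mapping_count (n : Nat) : (464, 468) ∈ ModeUpTo.wins n := List.Mem.head _

/-- The window `mode_count`, `mode_config[0 .. n)` is one of `ModeUpTo.wins n`. -/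
theorem ModeUpTo.wins_modes (n : Nat) : (480, 484 + 6 * n) ∈ ModeUpTo.wins n := List.Mem.tail _ (List.Mem.head _)

/-- The windows below a counter `n ≤ 64` lie inside `ModeOK.wins`: `he.sub (ModeUpTo.wins_sub hn)`. -/
theorem ModeUpTo.wins_sub {n : Nat} (hn : n ≤ 64) : WinsSub (ModeUpTo.wins n) ModeOK.wins := by
  intro w hw
  simp only [ModeUpTo.wins, List.mem_cons, List.mem_nil_iff, or_false] at hw
  rcases hw with rfl | rfl
  · exact ⟨(464, 468), by decide, Nat.le_refl _, Nat.le_refl _⟩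
  · refine ⟨(480, 868), by decide, Nat.le_refl _, ?_⟩
    show 484 + 6 * n ≤ 868
    omega

/-- **The blocks that `MappingUpTo … n` owns** (and whose content its clauses read): `mapping`, and `chan` of every record
below `n`. -/
inductive MappingUpTo.Owns (mem : Mem) (f n : Nat) : Block → Prop
  /-- `Block(mapping, 56·mapping_count)` (MP1) -/
  | table : MappingUpTo.Owns mem f n ⟨stb_vorbis.mapping mem f, Off.sizeof.Mapping * (stb_vorbis.mapping_count mem f).toNat⟩
  /-- `Block(chan, 3·C)` of record `i < n` (MP2) -/
  | chan (i : Nat) (hi : i < n) : MappingUpTo.Owns mem f n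
      ⟨Mapping.chan mem (stb_vorbis.mapping_at mem f i), Off.sizeof.MappingChannel * nchan mem f⟩

/-- **The blocks that `MappingOK` owns**: the mapping table and every `chan` block. -/
def MappingOK.Owns (mem : Mem) (f : Nat) : Block → Prop := MappingUpTo.Owns mem f (stb_vorbis.mapping_count mem f).toNat

/-- **The blocks whose CONTENT `MappingOK` reads**: exactly the blocks it owns. -/
abbrev MappingOK.Reads (mem : Mem) (f : Nat) : Block → Prop := MappingOK.Owns mem f

/-- `MappingOK` owns the mapping table. -/
theorem MappingOK.Owns.table {mem : Mem} {f : Nat} : MappingOK.Owns mem f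
    ⟨stb_vorbis.mapping mem f, Off.sizeof.Mapping * (stb_vorbis.mapping_count mem f).toNat⟩ :=
  MappingUpTo.Owns.table

/-- `MappingOK` owns `chan` of every record `i < mapping_count`. -/
theorem MappingOK.Owns.chan {mem : Mem} {f : Nat} (i : Nat) (hi : (i : Int) < stb_vorbis.mapping_count mem f) :
    MappingOK.Owns mem f
      ⟨Mapping.chan mem (stb_vorbis.mapping_at mem f i), Off.sizeof.MappingChannel * nchan mem f⟩ :=
  MappingUpTo.Owns.chan i (by omega)

/-- A smaller counter owns less. -/
theorem MappingUpTo.Owns.mono {mem : Mem} {f n m : Nat} {B : Block} (h : MappingUpTo.Owns mem f m B) (hm : m ≤ n) :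
    MappingUpTo.Owns mem f n B := by
  cases h with
  | table => exact MappingUpTo.Owns.table
  | chan i hi => exact MappingUpTo.Owns.chan i (by omega)

/-- **FRAME of MP2–MP6 for one record** (the record at `m` does not move; the decoder object may: `p` before, `f` after): the
three scalars of the object it compares with read the same (`he`), the record's 56 bytes and its `chan` block are kept, `chan`
is still allocated. -/
theorem MappingAtOK.frame {Blk Blk' : Block → Prop} {mem mem' : Mem} {p f m : Nat} (h : MappingAtOK Blk mem p m)
    (he : ObjEq MappingAtOK.wins mem p mem' f) (hm : (Block.mk m Off.sizeof.Mapping).Kept mem mem')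
    (hk : (Block.mk (Mapping.chan mem m) (Off.sizeof.MappingChannel * nchan mem p)).Kept mem mem')
    (hchan : Blk' ⟨Mapping.chan mem m, Off.sizeof.MappingChannel * nchan mem p⟩) : MappingAtOK Blk' mem' f m := by
  have hC : stb_vorbis.channels mem' f = stb_vorbis.channels mem p := by
    simp only [vacc, voff]
    exact he.i32 4 (by decide)
  have hfl : stb_vorbis.floor_count mem' f = stb_vorbis.floor_count mem p := by
    simp only [vacc, voff]
    exact he.i32 176 (by decide)
  have hrc : stb_vorbis.residue_count mem' f = stb_vorbis.residue_count mem p := by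
    simp only [vacc, voff]
    exact he.i32 320 (by decide)
  have hn : nchan mem' f = nchan mem p := by
    rw [nchan_def, nchan_def, hC]
  have e1 : Mapping.chan mem' m = Mapping.chan mem m := by
    simp only [vacc, voff]
    exact hm.u64 _ (by simp only []; omega) (by simp only [voff]; omega)
  have e2 : Mapping.submaps mem' m = Mapping.submaps mem m := by
    simp only [vacc, voff]
    exact hm.u8 _ (by simp only []; omega) (by simp only [voff]; omega)
  have e3 : Mapping.coupling_steps mem' m = Mapping.coupling_steps mem m := by
    simp only [vacc, voff]
    exact hm.u16 _ (by simp only []; omega) (by simp only [voff]; omega)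
  have h3 := h.MP3
  have e4 : ∀ s, s < 16 → Mapping.submap_floor mem' m s = Mapping.submap_floor mem m s := by
    intro s hs
    simp only [vacc, voff]
    exact hm.u8 _ (by simp only []; omega) (by simp only [voff]; omega)
  have e5 : ∀ s, s < 16 → Mapping.submap_residue mem' m s = Mapping.submap_residue mem m s := by
    intro s hs
    simp only [vacc, voff]
    exact hm.u8 _ (by simp only []; omega) (by simp only [voff]; omega)
  have eat : ∀ j, Mapping.chan_at mem' m j = Mapping.chan_at mem m j := by
    intro j
    unfold Mapping.chan_at
    rw [e1]
  -- the three bytes of channel record `j < C`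
  have ech : ∀ j : Nat, (j : Int) < stb_vorbis.channels mem p → ∀ o, o < 3 →
      mem'.u8 (Mapping.chan_at mem m j + o) = mem.u8 (Mapping.chan_at mem m j + o) := by
    intro j hj o ho
    apply hk.u8
    · simp only [vacc, voff]
      omega
    · simp only [nchan_def, vacc, voff] at hj ⊢
      omega
  have h4s := h.MP4_steps
  constructor
  · rw [e1, hn]
    exact hchan
  · rw [e2]
    exact h.MP3
  · rw [e3, hC]
    exact h.MP4_steps
  · intro k hk'
    rw [e3] at hk'
    have hkC : (k : Int) < stb_vorbis.channels mem p := by omega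
    have := h.MP4 k hk'
    unfold Mapping.CouplingOK at this ⊢
    simp only [MappingChannel.magnitude, MappingChannel.angle, voff] at this ⊢
    rw [eat k, ech k hkC 0 (by omega), ech k hkC 1 (by omega), hC]
    exact this
  · intro j hj
    rw [hC] at hj
    have := h.MP5 j hj
    unfold Mapping.MuxOK at this ⊢
    simp only [MappingChannel.mux, voff] at this ⊢
    rw [eat j, ech j hj 2 (by omega), e2]
    exact this
  · intro s hs
    rw [e2] at hs
    have := h.MP6 s hs
    unfold Mapping.SubmapOK at this ⊢
    rw [e4 s (by omega), e5 s (by omega), hfl, hrc]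
    exact this

/-- **The two-address frame lemma of `MappingUpTo`** (hence of the loop invariant MAPS(i)): the windows `MappingOK.wins` of the
object read the same, every owned block is kept and still allocated. -/
theorem MappingUpTo.transfer {Blk Blk' : Block → Prop} {mem mem' : Mem} {p f n : Nat} (h : MappingUpTo Blk mem p n)
    (he : ObjEq MappingOK.wins mem p mem' f) (hk : ∀ B, MappingUpTo.Owns mem p n B → B.Kept mem mem')
    (hB : ∀ B, MappingUpTo.Owns mem p n B → Blk B → Blk' B) : MappingUpTo Blk' mem' f n := by
  have ecount : stb_vorbis.mapping_count mem' f = stb_vorbis.mapping_count mem p := by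
    simp only [vacc, voff]
    exact he.i32 464 (by decide)
  have etab : stb_vorbis.mapping mem' f = stb_vorbis.mapping mem p := by
    simp only [vacc, voff]
    exact he.u64 472 (by decide)
  have eat : ∀ i, stb_vorbis.mapping_at mem' f i = stb_vorbis.mapping_at mem p i := by
    intro i
    unfold stb_vorbis.mapping_at
    rw [etab]
  have htab := hk _ MappingUpTo.Owns.table
  have h1 := h.MP1
  have hle := h.n_le
  refine ⟨?_, ?_, ?_, ?_⟩
  · rw [ecount]
    exact h.n_le
  · rw [ecount]
    exact h.MP1
  · rw [ecount, etab]
    exact hB _ MappingUpTo.Owns.table h.MP1_block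
  · intro i hi
    rw [eat i]
    have hm : (Block.mk (stb_vorbis.mapping_at mem p i) Off.sizeof.Mapping).Kept mem mem' := by
      apply htab.mono
      · simp only [vacc, voff]
        omega
      · simp only [vacc, voff] at h1 hle ⊢
        omega
    have hrec := h.record i hi
    exact hrec.frame (he.sub (by decide)) hm (hk _ (MappingUpTo.Owns.chan i hi))
      (hB _ (MappingUpTo.Owns.chan i hi) hrec.MP2)

/-- **FRAME of `MappingUpTo`** (same address, same block predicate). -/
theorem MappingUpTo.frame {Blk : Block → Prop} {mem mem' : Mem} {f n : Nat} (h : MappingUpTo Blk mem f n)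
    (hs : ObjSame f mem mem') (hk : ∀ B, MappingUpTo.Owns mem f n B → B.Kept mem mem') : MappingUpTo Blk mem' f n :=
  h.transfer (hs.sub (by decide)) hk (fun _ _ hb => hb)

/-- **THE TWO-ADDRESS FRAME LEMMA OF THE GROUP `MappingOK`**: the windows `MappingOK.wins` of the object at `f` in `mem'` read
as those of the object at `p` in `mem`; the mapping table and every `chan` block are kept and still allocated. -/
theorem MappingOK.transfer {Blk Blk' : Block → Prop} {mem mem' : Mem} {p f : Nat} (h : MappingOK Blk mem p)
    (he : ObjEq MappingOK.wins mem p mem' f) (hk : ∀ B, MappingOK.Reads mem p B → B.Kept mem mem')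
    (hB : ∀ B, MappingOK.Owns mem p B → Blk B → Blk' B) : MappingOK Blk' mem' f := by
  have hu := h.toUpTo.transfer he hk hB
  have ecount : stb_vorbis.mapping_count mem' f = stb_vorbis.mapping_count mem p := by
    simp only [vacc, voff]
    exact he.i32 464 (by decide)
  have h1 := h.MP1
  exact hu.toOK (by rw [ecount]; omega)

/-- **FRAME of `MappingOK`** (same address, same block predicate). -/
theorem MappingOK.frame {Blk : Block → Prop} {mem mem' : Mem} {f : Nat} (h : MappingOK Blk mem f)
    (hs : ObjSame f mem mem') (hk : ∀ B, MappingOK.Reads mem f B → B.Kept mem mem') : MappingOK Blk mem' f :=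
  h.transfer (hs.sub (by decide)) hk (fun _ _ hb => hb)

/-- Every owned block is allocated. -/
theorem MappingOK.owns_blk {Blk : Block → Prop} {mem : Mem} {f : Nat} {B : Block} (h : MappingOK Blk mem f)
    (hO : MappingOK.Owns mem f B) : Blk B := by
  have hu := h.toUpTo
  cases hO with
  | table => exact h.MP1_block
  | chan i hi => exact (hu.record i hi).MP2

/-- Every block whose content is read is allocated (`Reads` is `Owns`). -/
theorem MappingOK.reads_blk {Blk : Block → Prop} {mem : Mem} {f : Nat} {B : Block} (h : MappingOK Blk mem f)
    (hR : MappingOK.Reads mem f B) : Blk B :=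
  h.owns_blk hR

/-- **Nothing changed in memory, only the notion of allocated block**: the instance `mem' = mem`, `p = f` of `transfer`,
proved directly. -/
theorem MappingOK.reblk {Blk Blk' : Block → Prop} {mem : Mem} {f : Nat} (h : MappingOK Blk mem f)
    (hB : ∀ B, MappingOK.Owns mem f B → Blk B → Blk' B) : MappingOK Blk' mem f := by
  refine ⟨h.MP1, hB _ MappingOK.Owns.table h.MP1_block, ?_⟩
  intro i hi
  have hrec := h.record i hi
  exact ⟨hB _ (MappingOK.Owns.chan i hi) hrec.MP2, hrec.MP3, hrec.MP4_steps, hrec.MP4, hrec.MP5, hrec.MP6⟩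

/-- **The two-address frame lemma of `ModeUpTo`, fine form** (it owns no block: everything is in `*f`): the windows
`ModeUpTo.wins n` of the object read the same (so the stores into `mode_config[i']`, `i' ≥ n`, are allowed). -/
theorem ModeUpTo.transfer_below {mem mem' : Mem} {p f n : Nat} (h : ModeUpTo mem p n)
    (he : ObjEq (ModeUpTo.wins n) mem p mem' f) : ModeUpTo mem' f n := by
  have ecount : stb_vorbis.mode_count mem' f = stb_vorbis.mode_count mem p := by
    simp only [vacc, voff]
    apply he.i32 480
    apply InWins.of_mem _ (ModeUpTo.wins_modes n)
    · exact Nat.le_refl _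
    · show 480 + 4 ≤ 484 + 6 * n
      omega
  have hmc : stb_vorbis.mapping_count mem' f = stb_vorbis.mapping_count mem p := by
    simp only [vacc, voff]
    exact he.i32 464 (InWins.of_mem _ (ModeUpTo.wins_mapping_count n) (Nat.le_refl _) (Nat.le_refl _))
  have h1 := h.MD1
  have hle := h.n_le
  refine ⟨?_, ?_, ?_⟩
  · rw [ecount]
    exact h.n_le
  · rw [ecount]
    exact h.MD1
  · intro i hi
    have := h.MD2 i hi
    unfold ModeRecOK at this ⊢
    -- the `k` bytes at offset `o` of mode record `i < n` lie inside the window of the modes below the counter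
    have hw : ∀ o k : Nat, o + k ≤ 6 → InWins (ModeUpTo.wins n) (484 + 6 * i + o) k := by
      intro o k hok
      apply InWins.of_mem _ (ModeUpTo.wins_modes n)
      · show 480 ≤ 484 + 6 * i + o
        omega
      · show 484 + 6 * i + o + k ≤ 484 + 6 * n
        omega
    have b0 : Mode.blockflag mem' (stb_vorbis.mode_config_at f i) = Mode.blockflag mem (stb_vorbis.mode_config_at p i) := by
      simp only [vacc, voff]
      exact he.u8_at (484 + 6 * i + 0) (hw 0 1 (by omega)) (by omega) (by omega)
    have b1 : Mode.mapping mem' (stb_vorbis.mode_config_at f i) = Mode.mapping mem (stb_vorbis.mode_config_at p i) := by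
      simp only [vacc, voff]
      exact he.u8_at (484 + 6 * i + 1) (hw 1 1 (by omega)) (by omega) (by omega)
    have b2 : Mode.windowtype mem' (stb_vorbis.mode_config_at f i)
        = Mode.windowtype mem (stb_vorbis.mode_config_at p i) := by
      simp only [vacc, voff]
      exact he.u16_at (484 + 6 * i + 2) (hw 2 2 (by omega)) (by omega) (by omega)
    have b3 : Mode.transformtype mem' (stb_vorbis.mode_config_at f i)
        = Mode.transformtype mem (stb_vorbis.mode_config_at p i) := by
      simp only [vacc, voff]
      exact he.u16_at (484 + 6 * i + 4) (hw 4 2 (by omega)) (by omega) (by omega)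
    rw [b0, b1, b2, b3, hmc]
    exact this

/-- **The two-address frame lemma of `ModeUpTo`** over the windows of the group (`ModeOK.wins`). -/
theorem ModeUpTo.transfer {mem mem' : Mem} {p f n : Nat} (h : ModeUpTo mem p n) (he : ObjEq ModeOK.wins mem p mem' f) :
    ModeUpTo mem' f n := by
  have h1 := h.MD1
  have hle := h.n_le
  exact h.transfer_below (he.sub (ModeUpTo.wins_sub (by omega)))

/-- **FRAME of `ModeUpTo`** (same address). -/
theorem ModeUpTo.frame {mem mem' : Mem} {f n : Nat} (h : ModeUpTo mem f n) (hs : ObjSame f mem mem') : ModeUpTo mem' f n :=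
  h.transfer (hs.sub (by decide))

/-- **THE TWO-ADDRESS FRAME LEMMA OF THE GROUP `ModeOK`** (no block: every read is inside the object): the windows
`ModeOK.wins` of the object at `f` in `mem'` read as those of the object at `p` in `mem`. -/
theorem ModeOK.transfer {mem mem' : Mem} {p f : Nat} (h : ModeOK mem p) (he : ObjEq ModeOK.wins mem p mem' f) :
    ModeOK mem' f := by
  have hu := h.toUpTo.transfer he
  have ecount : stb_vorbis.mode_count mem' f = stb_vorbis.mode_count mem p := by
    simp only [vacc, voff]
    exact he.i32 480 (by decide)
  have h1 := h.MD1
  exact hu.toOK (by rw [ecount]; omega)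

/-- **FRAME of `ModeOK`** (same address). -/
theorem ModeOK.frame {mem mem' : Mem} {f : Nat} (h : ModeOK mem f) (hs : ObjSame f mem mem') : ModeOK mem' f :=
  h.transfer (hs.sub (by decide))

/-- **The block that H5 mentions**: the mapping table (it may be NULL: no `owns_blk`). H5 reads no block content. -/
inductive MappingDeinitOK.Owns (mem : Mem) (f : Nat) : Block → Prop
  /-- `Block(mapping, 56·mapping_count)` -/
  | table : MappingDeinitOK.Owns mem f
      ⟨stb_vorbis.mapping mem f, Off.sizeof.Mapping * (stb_vorbis.mapping_count mem f).toNat⟩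

/-- **THE TWO-ADDRESS FRAME LEMMA OF H5** (window `[464, 480)`; no block content is read). -/
theorem MappingDeinitOK.transfer {Blk Blk' : Block → Prop} {mem mem' : Mem} {p f : Nat} (h : MappingDeinitOK Blk mem p)
    (he : ObjEq MappingDeinitOK.wins mem p mem' f) (hB : ∀ B, MappingDeinitOK.Owns mem p B → Blk B → Blk' B) :
    MappingDeinitOK Blk' mem' f := by
  have ecount : stb_vorbis.mapping_count mem' f = stb_vorbis.mapping_count mem p := by
    simp only [vacc, voff]
    exact he.i32 464 (by decide)
  have etab : stb_vorbis.mapping mem' f = stb_vorbis.mapping mem p := by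
    simp only [vacc, voff]
    exact he.u64 472 (by decide)
  unfold MappingDeinitOK
  rw [etab, ecount]
  cases h with
  | inl h0 => exact Or.inl h0
  | inr h1 => exact Or.inr (hB _ MappingDeinitOK.Owns.table h1)

/-- **FRAME of H5** (same address, same block predicate). -/
theorem MappingDeinitOK.frame {Blk : Block → Prop} {mem mem' : Mem} {f : Nat} (h : MappingDeinitOK Blk mem f)
    (hs : ObjSame f mem mem') : MappingDeinitOK Blk mem' f :=
  h.transfer (hs.sub (by decide)) (fun _ _ hb => hb)

/-- vorbis_deinit, `p->mapping[i].chan` after the NULL test of `p->mapping` (load8 at `mapping + 56i + 8`; the value is passed to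
the no-op `setup_free`). -/
theorem MappingDeinitOK.site_record {Live : Nat → Prop} {Blk : Block → Prop} {mem : Mem} {f : Nat} (hL : BlkLive Blk Live)
    (h : MappingDeinitOK Blk mem f) (hne : stb_vorbis.mapping mem f ≠ 0) {i : Nat}
    (hi : (i : Int) < stb_vorbis.mapping_count mem f) (off n : Nat) (hoff : off + n ≤ Off.sizeof.Mapping) (hn : 1 ≤ n)
    {a : Nat} (ha : a = stb_vorbis.mapping_at mem f i + off) : Site Live a n := by
  subst ha
  cases h with
  | inl h0 => exact absurd h0 hne
  | inr h1 =>
    apply Site.of_blk hL h1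
    · simp only [vacc, voff]
      omega
    · simp only [vacc, voff] at hi hoff ⊢
      omega
    · exact hn

/-! ### Assembling one mapping record at the end of start_decoder.R12 -/

/-- MP2 by R9, MP3 by R9, MP4 by R9 / R10 (`Res.forall_lt_succ` on `Mapping.CouplingOK`), MP5 by R11 (on `Mapping.MuxOK`; the
`submaps = 1` arm stores `mux = 0 < 1`), MP6 by R12 (on `Mapping.SubmapOK`). -/
theorem MappingAtOK.assemble {Blk : Block → Prop} {mem : Mem} {f m : Nat}
    (h2 : Blk ⟨Mapping.chan mem m, Off.sizeof.MappingChannel * nchan mem f⟩)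
    (h3 : 1 ≤ Mapping.submaps mem m ∧ Mapping.submaps mem m ≤ 16)
    (h4s : (Mapping.coupling_steps mem m : Int) ≤ stb_vorbis.channels mem f)
    (h4 : ∀ k : Nat, k < Mapping.coupling_steps mem m → Mapping.CouplingOK mem f m k)
    (h5 : ∀ j : Nat, j < nchan mem f → Mapping.MuxOK mem m j)
    (h6 : ∀ s : Nat, s < Mapping.submaps mem m → Mapping.SubmapOK mem f m s) : MappingAtOK Blk mem f m := by
  refine ⟨h2, h3, h4s, h4, ?_, h6⟩
  intro j hj
  apply h5 j
  rw [nchan_def]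
  omega

/-- `coupling_steps = 0` (the `else` arm 4118): MP4 holds vacuously. -/
theorem Mapping.coupling_zero {mem : Mem} {f m : Nat} (h0 : Mapping.coupling_steps mem m = 0)
    (hC : 0 ≤ stb_vorbis.channels mem f) :
    (Mapping.coupling_steps mem m : Int) ≤ stb_vorbis.channels mem f ∧
      ∀ k : Nat, k < Mapping.coupling_steps mem m → Mapping.CouplingOK mem f m k := by
  constructor
  · omega
  · intro k hk
    omega

end Vorbis
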